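-- pv_equiv track=rewrite | github.com/Abel-Lagonell/Alg_Design | MiniProject_2/Grid.py | __addArray
-- ===== SOURCE A (Python) =====
-- def __addArray(arr1:list[int], ID:int) -> list[int]:
--     for i in range(len(arr1)):
--         for j in range(len(arr1)):
--             if (arr1[j] == arr1[i] and arr1[j] != -1 and i != j):
--                 return arr1
--         if (arr1[i] == -1):
--             arr1[i] = ID
--             return arr1
-- ===== SOURCE B (Python) =====
-- def __addArray(arr1: list[int], ID: int) -> list[int]:
--     # Count every value once, locate the first empty (-1) slot, then decide:
--     # a duplicated non-(-1) value in the prefix before the slot blocks the insert.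
--     counts = {}
--     for x in arr1:
--         counts[x] = counts.get(x, 0) + 1
--     k = next((i for i, x in enumerate(arr1) if x == -1), len(arr1))
--     if any(counts[x] > 1 for x in arr1[:k]):
--         return arr1
--     if k < len(arr1):
--         arr1[k] = ID
--         return arr1
--     return None
-- ===== Notes on version B (the rewrite author's own statement) =====
-- stated objective: alternative
-- what changed: A makes a nested first-trigger scan (for each index an inner full duplicate scan, then the -1 test); B instead builds a count map in one pass, locates the first -1 slot k, and decides with a single duplicate test over the prefix arr1[:k].
import Mathlib
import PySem

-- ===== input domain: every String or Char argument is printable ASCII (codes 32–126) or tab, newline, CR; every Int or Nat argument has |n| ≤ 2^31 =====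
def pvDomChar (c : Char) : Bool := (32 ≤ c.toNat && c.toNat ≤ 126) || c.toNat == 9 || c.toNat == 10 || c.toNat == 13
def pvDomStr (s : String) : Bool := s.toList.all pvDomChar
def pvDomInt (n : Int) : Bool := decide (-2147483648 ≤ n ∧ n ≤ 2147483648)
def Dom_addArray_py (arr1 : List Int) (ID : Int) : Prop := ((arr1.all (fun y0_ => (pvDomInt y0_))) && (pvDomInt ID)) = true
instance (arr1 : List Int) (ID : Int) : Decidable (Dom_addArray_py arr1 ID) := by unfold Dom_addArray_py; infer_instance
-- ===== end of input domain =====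

-- B replaces A's nested first-trigger scan with a one-pass count map plus a single
-- duplicate test over the prefix before the first -1 slot (alternative decomposition;
-- both Pythons mutate arr1 in place identically: equivalence proved on return values).


-- ===== PORT A =====
-- inner loop: 'for j in range(len(arr1)): if (arr1[j] == arr1[i] and arr1[j] != -1 and i != j): return arr1'
def aInner (arr1 : List Int) (i : Nat) : Bool :=
  (List.range arr1.length).any
    (fun j => arr1.getD j 0 == arr1.getD i 0 && arr1.getD j 0 != -1 && i != j)

-- outer loop: 'for i in range(len(arr1))', with the implicit fall-through 'return None'
def aLoop (arr1 : List Int) (ID : Int) : List Nat → Option (List Int)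
  | [] => none
  | i :: rest =>
    if aInner arr1 i then some arr1
    else if arr1.getD i 0 == -1 then some (arr1.set i ID)
    else aLoop arr1 ID rest

def addArray_py (arr1 : List Int) (ID : Int) : Option (List Int) :=
  aLoop arr1 ID (List.range arr1.length)

-- ===== PORT B =====
def addArray_py_alt (arr1 : List Int) (ID : Int) : Option (List Int) :=
  let counts : PySem.Dict Int Int := arr1.foldl (fun d x => d.insert x (d.getD x 0 + 1)) PySem.Dict.empty
  let k := arr1.findIdx (fun x => x == -1)
  if (arr1.take k).any (fun x => counts.getD x 0 > 1) then some arr1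
  else if k < arr1.length then some (arr1.set k ID)
  else none

-- ===== PRECONDITION & SPEC =====
def Spec_addArray_py (arr1 : List Int) (ID : Int) (out : Option (List Int)) : Prop := out = addArray_py_alt arr1 ID
instance (arr1 : List Int) (ID : Int) (out : Option (List Int)) : Decidable (Spec_addArray_py arr1 ID out) := by unfold Spec_addArray_py; infer_instance

-- ===== CLAIM (what is proved, stated in full; the proofs are below) =====
def Claim_equal_addArray_py : Prop := ∀ (arr1 : List Int) (ID : Int), Dom_addArray_py arr1 ID → Spec_addArray_py arr1 ID (addArray_py arr1 ID)

-- ===== LEMMAS AND PROOFS =====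

-- A's inner scan never fires at a -1 cell ('arr1[j] != -1' blocks the only candidates)
lemma aInner_neg (arr1 : List Int) (i : Nat) (h : arr1.getD i 0 = -1) :
    aInner arr1 i = false := by
  rw [Bool.eq_false_iff]
  intro ht
  simp only [aInner, List.any_eq_true, List.mem_range] at ht
  obtain ⟨j, hj, hc⟩ := ht
  simp only [h, Bool.and_eq_true, beq_iff_eq, bne_iff_ne, ne_eq] at hc
  exact hc.1.2 hc.1.1

-- two distinct positions holding the same value give count > 1
lemma two_idx_count (l : List Int) (i j : Nat) (hi : i < l.length) (hj : j < l.length)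
    (hne : j ≠ i) (he : l[j] = l[i]) : 1 < l.count l[i] := by
  rcases Nat.lt_or_ge j i with hlt | hge
  · -- positions j < i
    have h1 : l[i] ∈ l.take i := by
      have hp : j < (l.take i).length := by simp [List.length_take]; omega
      have : (l.take i)[j]'hp = l[j] := List.getElem_take
      rw [← he]
      exact this ▸ List.getElem_mem hp
    have h2 : 0 < (l.take i).count l[i] := List.count_pos_iff.mpr h1
    have h3 : l.count l[i] = (l.take i).count l[i] + (l.drop i).count l[i] := by
      rw [← List.count_append, List.take_append_drop]
    have h4 : 0 < (l.drop i).count l[i] := by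
      rw [← List.getElem_cons_drop hi, List.count_cons]
      simp
    omega
  · have hlt : i < j := lt_of_le_of_ne hge (Ne.symm hne)
    have h1 : l[i] ∈ l.take j := by
      have hp : i < (l.take j).length := by simp [List.length_take]; omega
      have : (l.take j)[i]'hp = l[i] := List.getElem_take
      exact this ▸ List.getElem_mem hp
    have h2 : 0 < (l.take j).count l[i] := List.count_pos_iff.mpr h1
    have h3 : l.count l[i] = (l.take j).count l[i] + (l.drop j).count l[i] := by
      rw [← List.count_append, List.take_append_drop]
    have h4 : 0 < (l.drop j).count l[i] := by
      rw [← List.getElem_cons_drop hj, List.count_cons]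
      simp [he]
    omega

-- count > 1 yields a second position with the same value
lemma exists_other_idx (l : List Int) (i : Nat) (hi : i < l.length)
    (hc : 1 < l.count l[i]) : ∃ j, ∃ _ : j < l.length, j ≠ i ∧ l[j] = l[i] := by
  have h3 : l.count l[i] = (l.take i).count l[i] + (l.drop i).count l[i] := by
    rw [← List.count_append, List.take_append_drop]
  have h4 : (l.drop i).count l[i] = (l.drop (i + 1)).count l[i] + 1 := by
    rw [← List.getElem_cons_drop hi, List.count_cons]
    simp
  rcases Nat.lt_or_ge 0 ((l.take i).count l[i]) with hpos | hz
  · obtain ⟨m, hm, hme⟩ := List.getElem_of_mem (List.count_pos_iff.mp hpos)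
    have hmi : m < i := by have := hm; simp [List.length_take] at this; omega
    refine ⟨m, by omega, by omega, ?_⟩
    rw [← hme, List.getElem_take]
  · have : 0 < (l.drop (i + 1)).count l[i] := by omega
    obtain ⟨m, hm, hme⟩ := List.getElem_of_mem (List.count_pos_iff.mp this)
    have hml : m < l.length - (i + 1) := by simpa using hm
    refine ⟨i + 1 + m, by omega, by omega, ?_⟩
    rw [← hme, List.getElem_drop]

-- a non-(-1) duplicated value makes A's inner scan fire
lemma aInner_intro (arr1 : List Int) (i : Nat) (hi : i < arr1.length)
    (hx : arr1[i] ≠ -1) (hc : 1 < arr1.count arr1[i]) : aInner arr1 i = true := by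
  obtain ⟨j, hj, hji, he⟩ := exists_other_idx arr1 i hi hc
  simp only [aInner, List.any_eq_true, List.mem_range]
  refine ⟨j, hj, ?_⟩
  rw [List.getD_eq_getElem _ _ hj, List.getD_eq_getElem _ _ hi]
  simp [he, hx, Ne.symm hji]

-- conversely, a firing inner scan means the value at i is duplicated
lemma aInner_count (arr1 : List Int) (i : Nat) (hi : i < arr1.length)
    (h : aInner arr1 i = true) : 1 < arr1.count arr1[i] := by
  simp only [aInner, List.any_eq_true, List.mem_range] at h
  obtain ⟨j, hj, hc⟩ := h
  rw [List.getD_eq_getElem _ _ hj, List.getD_eq_getElem _ _ hi] at hc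
  simp only [Bool.and_eq_true, beq_iff_eq, bne_iff_ne, ne_eq] at hc
  exact two_idx_count arr1 i j hi hj (fun hji => hc.2 hji.symm) hc.1.1

-- the condition on which A's outer loop stops at index i
def cFun (arr1 : List Int) : Nat → Bool := fun i => aInner arr1 i || arr1.getD i 0 == -1

-- A's outer loop = find the first stopping index, then branch
lemma aLoop_char (arr1 : List Int) (ID : Int) (l : List Nat) :
    aLoop arr1 ID l = match l.find? (cFun arr1) with
      | none => none
      | some i => if aInner arr1 i then some arr1 else some (arr1.set i ID) := by
  induction l with
  | nil => rfl
  | cons i rest ih =>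
    rw [List.find?_cons]
    have hstep : aLoop arr1 ID (i :: rest) =
        if aInner arr1 i then some arr1
        else if arr1.getD i 0 == -1 then some (arr1.set i ID)
        else aLoop arr1 ID rest := rfl
    rw [hstep]
    by_cases h1 : aInner arr1 i = true
    · have hc : cFun arr1 i = true := by simp only [cFun, h1, Bool.true_or]
      rw [hc, if_pos h1]
      simp [h1]
    · by_cases h2 : (arr1.getD i 0 == -1) = true
      · have hc : cFun arr1 i = true := by simp only [cFun, h2, Bool.or_true]
        rw [hc, if_neg h1, if_pos h2]
        simp [h1]
      · have hb1 : aInner arr1 i = false := by simpa using h1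
        have hb2 : (arr1.getD i 0 == -1) = false := by simpa using h2
        have hc : cFun arr1 i = false := by simp only [cFun, hb1, hb2, Bool.or_self]
        rw [hc, if_neg h1, if_neg h2]
        exact ih

-- below the first -1 slot, with no duplicated prefix value, A's loop does not stop
lemma prefix_clear (arr1 : List Int) (j : Nat)
    (hj : j < arr1.findIdx (fun x => x == -1))
    (hno : ¬ ∃ x ∈ arr1.take (arr1.findIdx (fun x => x == -1)), 1 < arr1.count x) :
    cFun arr1 j = false := by
  have hkn : arr1.findIdx (fun x => x == -1) ≤ arr1.length := List.findIdx_le_length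
  have hjn : j < arr1.length := lt_of_lt_of_le hj hkn
  have hne : arr1[j] ≠ -1 := by
    have := List.not_of_lt_findIdx (p := fun x => x == -1) hj
    simpa using this
  rw [cFun, Bool.or_eq_false_iff]
  constructor
  · by_contra hA
    rw [Bool.not_eq_false] at hA
    have hcnt := aInner_count arr1 j hjn hA
    refine hno ⟨arr1[j], ?_, hcnt⟩
    have hlt : j < (arr1.take (arr1.findIdx (fun x => x == -1))).length := by
      rw [List.length_take]; omega
    have he : (arr1.take (arr1.findIdx (fun x => x == -1)))[j]'hlt = arr1[j] :=
      List.getElem_take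
    exact he ▸ List.getElem_mem hlt
  · rw [List.getD_eq_getElem _ _ hjn]
    simpa using hne

lemma addArray_eq (arr1 : List Int) (ID : Int) :
    addArray_py arr1 ID = addArray_py_alt arr1 ID := by
  simp only [addArray_py, addArray_py_alt,
    PySem.Dict.foldl_insert_getD_add_one_eq_counter]
  rw [aLoop_char]
  have hkn : arr1.findIdx (fun x => x == -1) ≤ arr1.length := List.findIdx_le_length
  split_ifs with hB hK
  · -- a duplicate in the prefix: A stops with 'return arr1'
    simp only [List.any_eq_true, decide_eq_true_eq, PySem.Dict.getD_counter,
      Nat.one_lt_cast] at hB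
    obtain ⟨x, hxm, hxc⟩ := hB
    obtain ⟨p, hp, hpe⟩ := List.getElem_of_mem hxm
    have hpk : p < arr1.findIdx (fun x => x == -1) := by
      rw [List.length_take] at hp; omega
    have hpn : p < arr1.length := lt_of_lt_of_le hpk hkn
    have hpx : arr1[p] = x := by rw [← hpe, List.getElem_take]
    have hpne : arr1[p] ≠ -1 := by
      have := List.not_of_lt_findIdx (p := fun x => x == -1) hpk
      simpa using this
    have hpA : aInner arr1 p = true := aInner_intro arr1 p hpn hpne (by rw [hpx]; exact hxc)
    have hcp : cFun arr1 p = true := by rw [cFun]; simp [hpA]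
    cases hfind : (List.range arr1.length).find? (cFun arr1) with
    | none =>
      exfalso
      rw [List.find?_eq_none] at hfind
      exact hfind p (List.mem_range.mpr hpn) hcp
    | some m =>
      rw [List.find?_eq_some_iff_getElem] at hfind
      obtain ⟨hcm, idx, hidx, hidxe, hmin⟩ := hfind
      rw [List.getElem_range] at hidxe
      subst hidxe
      have hmn : idx < arr1.length := by simpa using hidx
      have hmle : idx ≤ p := by
        by_contra hgt
        have := hmin p (by omega)
        rw [List.getElem_range] at this
        simp [hcp] at this
      have hmk : idx < arr1.findIdx (fun x => x == -1) := lt_of_le_of_lt hmle hpk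
      have hmne : arr1.getD idx 0 ≠ -1 := by
        rw [List.getD_eq_getElem _ _ hmn]
        have := List.not_of_lt_findIdx (p := fun x => x == -1) hmk
        simpa using this
      have hA : aInner arr1 idx = true := by
        rw [cFun] at hcm
        rcases Bool.or_eq_true_iff.mp hcm with h | h
        · exact h
        · exact absurd (by simpa using h) hmne
      simp [hA]
  · -- no duplicate before the first -1 slot: A fills it with ID
    simp only [List.any_eq_true, decide_eq_true_eq, PySem.Dict.getD_counter,
      Nat.one_lt_cast] at hB
    have hck : cFun arr1 (arr1.findIdx (fun x => x == -1)) = true := by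
      rw [cFun]
      have := List.findIdx_getElem (p := fun x => x == -1) (xs := arr1) (w := hK)
      rw [List.getD_eq_getElem _ _ hK]
      simp only [this, Bool.or_true]
    have hfind : (List.range arr1.length).find? (cFun arr1)
        = some (arr1.findIdx (fun x => x == -1)) := by
      rw [List.find?_eq_some_iff_getElem]
      refine ⟨hck, arr1.findIdx (fun x => x == -1), by simpa using hK, List.getElem_range _, ?_⟩
      intro j hj
      rw [List.getElem_range]
      simp [prefix_clear arr1 j hj hB]
    rw [hfind]
    have hA0 : aInner arr1 (arr1.findIdx (fun x => x == -1)) = false := by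
      apply aInner_neg
      rw [List.getD_eq_getElem _ _ hK]
      have := List.findIdx_getElem (p := fun x => x == -1) (xs := arr1) (w := hK)
      simpa using this
    simp [hA0]
  · -- no duplicate and no -1 slot: A falls through to 'return None'
    simp only [List.any_eq_true, decide_eq_true_eq, PySem.Dict.getD_counter,
      Nat.one_lt_cast] at hB
    have hkeq : arr1.findIdx (fun x => x == -1) = arr1.length := by omega
    have hfind : (List.range arr1.length).find? (cFun arr1) = none := by
      rw [List.find?_eq_none]
      intro j hjm
      rw [List.mem_range] at hjm
      simp [prefix_clear arr1 j (by omega) hB]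
    rw [hfind]

-- ===== VERDICT (by name: the statement is the Claim_ definition above) =====
theorem addArray_py_spec : Claim_equal_addArray_py := by
  intro arr1 ID _
  unfold Spec_addArray_py
  exact addArray_eq arr1 ID
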